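-- pv_equiv track=rewrite | github.com/TimLai666/usegolib | src/usegolib/builder/build.py | _substitute_type
-- ===== SOURCE A (Python) =====
-- def _substitute_type(t: str, mapping: dict[str, str]) -> str:
--     t = t.strip()
--     if t.startswith("*"):
--         return "*" + _substitute_type(t[1:], mapping)
--     if t.startswith("[]"):
--         return "[]" + _substitute_type(t[2:], mapping)
--     if t.startswith("map[string]"):
--         return "map[string]" + _substitute_type(t[len("map[string]") :], mapping)
--     return mapping.get(t, t)
-- ===== SOURCE B (Python) =====
-- def _substitute_type(t: str, mapping: dict[str, str]) -> str:
--     # Iterative: peel all prefixes into a parts list, then one final lookup.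
--     parts = []
--     t = t.strip()
--     while True:
--         if t.startswith("*"):
--             parts.append("*")
--             t = t[1:].strip()
--         elif t.startswith("[]"):
--             parts.append("[]")
--             t = t[2:].strip()
--         elif t.startswith("map[string]"):
--             parts.append("map[string]")
--             t = t[11:].strip()
--         else:
--             break
--     return "".join(parts) + mapping.get(t, t)
-- ===== Notes on version B (the rewrite author's own statement) =====
-- stated objective: simpler
-- what changed: Replaces the recursion with an iterative loop that strips and peels the recognized prefixes into an accumulated parts list, doing a single join and mapping lookup at the end instead of rebuilding the string up the call stack.
import Mathlib
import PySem

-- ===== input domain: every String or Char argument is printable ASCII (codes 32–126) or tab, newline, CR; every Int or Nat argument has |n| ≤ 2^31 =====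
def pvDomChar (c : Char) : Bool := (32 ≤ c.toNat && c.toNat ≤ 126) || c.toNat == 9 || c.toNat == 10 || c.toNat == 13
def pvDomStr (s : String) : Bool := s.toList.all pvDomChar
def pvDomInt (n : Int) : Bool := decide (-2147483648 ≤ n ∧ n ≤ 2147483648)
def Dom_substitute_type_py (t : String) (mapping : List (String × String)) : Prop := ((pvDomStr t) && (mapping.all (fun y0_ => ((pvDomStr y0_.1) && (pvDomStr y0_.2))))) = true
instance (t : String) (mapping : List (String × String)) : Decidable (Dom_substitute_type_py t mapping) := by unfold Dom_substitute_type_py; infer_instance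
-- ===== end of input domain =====

-- B replaces A's recursion by an iterative prefix-peeling loop with a parts accumulator and a single final lookup (objective: simpler).


-- strip never lengthens a string (used by the ports' termination proofs)
theorem strip_len_le (s : List Char) : (PySem.Chars.strip s).length ≤ s.length := by
  simp only [PySem.Chars.strip, PySem.Chars.rstrip, PySem.Chars.lstrip, List.length_reverse]
  calc (List.dropWhile PySem.Chars.isspace (List.dropWhile PySem.Chars.isspace s).reverse).length
      ≤ (List.dropWhile PySem.Chars.isspace s).reverse.length := List.length_dropWhile_le _ _
    _ ≤ s.length := by simpa using List.length_dropWhile_le _ s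

-- ===== PORT A =====
-- recursion on the char list; t[k:] with literal k ≥ 0 is List.drop k (exact)
def substitute_type_chars (t : List Char) (mapping : List (String × String)) : List Char :=
  let s := PySem.Chars.strip t
  if h1 : PySem.Chars.startswith s ['*'] then
    '*' :: substitute_type_chars (s.drop 1) mapping
  else if h2 : PySem.Chars.startswith s ['[', ']'] then
    '[' :: ']' :: substitute_type_chars (s.drop 2) mapping
  else if h3 : PySem.Chars.startswith s "map[string]".toList then
    "map[string]".toList ++ substitute_type_chars (s.drop 11) mapping
  else
    ((PySem.Dict.mk mapping).getD (String.ofList s) (String.ofList s)).toList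
termination_by t.length
decreasing_by
  all_goals
    first
    | have hp := ((PySem.Chars.startswith_iff _ _).mp h1).length_le
    | have hp := ((PySem.Chars.startswith_iff _ _).mp h2).length_le
    | have hp := ((PySem.Chars.startswith_iff _ _).mp h3).length_le
    have hs := strip_len_le t
    have h11 : ("map[string]".toList).length = 11 := by decide
    simp only [s, List.length_drop, List.length_cons, List.length_nil, h11] at hp ⊢
    omega

def substitute_type_py (t : String) (mapping : List (String × String)) : String :=
  String.ofList (substitute_type_chars t.toList mapping)

-- ===== PORT B =====
-- the while loop: peel recognized prefixes into a parts list; input is already stripped,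
-- and each peeled remainder is re-stripped before the next test (as Source B does)
def peel_chars (t : List Char) : List (List Char) × List Char :=
  if h1 : PySem.Chars.startswith t ['*'] then
    let r := peel_chars (PySem.Chars.strip (t.drop 1))
    (['*'] :: r.1, r.2)
  else if h2 : PySem.Chars.startswith t ['[', ']'] then
    let r := peel_chars (PySem.Chars.strip (t.drop 2))
    (['[', ']'] :: r.1, r.2)
  else if h3 : PySem.Chars.startswith t "map[string]".toList then
    let r := peel_chars (PySem.Chars.strip (t.drop 11))
    ("map[string]".toList :: r.1, r.2)
  else
    ([], t)
termination_by t.length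
decreasing_by
  all_goals
    have h11 : ("map[string]".toList).length = 11 := by decide
    first
    | (have hp := ((PySem.Chars.startswith_iff _ _).mp h1).length_le
       have hs := strip_len_le (t.drop 1))
    | (have hp := ((PySem.Chars.startswith_iff _ _).mp h2).length_le
       have hs := strip_len_le (t.drop 2))
    | (have hp := ((PySem.Chars.startswith_iff _ _).mp h3).length_le
       have hs := strip_len_le (t.drop 11))
    simp only [List.length_drop, List.length_cons, List.length_nil, h11] at hp hs ⊢
    omega

def substitute_type_py_alt (t : String) (mapping : List (String × String)) : String :=
  let r := peel_chars (PySem.Chars.strip t.toList)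
  String.ofList (r.1.flatten ++ ((PySem.Dict.mk mapping).getD (String.ofList r.2) (String.ofList r.2)).toList)

-- ===== PRECONDITION & SPEC =====
def Spec_substitute_type_py (t : String) (mapping : List (String × String)) (out : String) : Prop := out = substitute_type_py_alt t mapping
instance (t : String) (mapping : List (String × String)) (out : String) : Decidable (Spec_substitute_type_py t mapping out) := by unfold Spec_substitute_type_py; infer_instance

-- ===== CLAIM (what is proved, stated in full; the proofs are below) =====
def Claim_equal_substitute_type_py : Prop := ∀ (t : String) (mapping : List (String × String)), Dom_substitute_type_py t mapping → Spec_substitute_type_py t mapping (substitute_type_py t mapping)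

-- ===== LEMMAS AND PROOFS =====
theorem subst_eq_peel (n : Nat) (t : List Char) (mapping : List (String × String))
    (hn : t.length ≤ n) :
    substitute_type_chars t mapping =
      (peel_chars (PySem.Chars.strip t)).1.flatten ++
        ((PySem.Dict.mk mapping).getD (String.ofList (peel_chars (PySem.Chars.strip t)).2)
          (String.ofList (peel_chars (PySem.Chars.strip t)).2)).toList := by
  induction n generalizing t with
  | zero =>
    rw [substitute_type_chars, peel_chars]
    have hs := strip_len_le t
    have hlen : (PySem.Chars.strip t).length = 0 := by omega
    have hnil : PySem.Chars.strip t = [] := List.length_eq_zero_iff.mp hlen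
    simp [hnil, PySem.Chars.startswith]
  | succ n ih =>
    have hlit : "map[string]".toList = ['m','a','p','[','s','t','r','i','n','g',']'] := by decide
    rw [substitute_type_chars, peel_chars]
    have hs := strip_len_le t
    simp only [hlit]
    by_cases h1 : PySem.Chars.startswith (PySem.Chars.strip t) ['*']
    · have hp := ((PySem.Chars.startswith_iff _ _).mp h1).length_le
      have hlen : ((PySem.Chars.strip t).drop 1).length ≤ n := by
        simp only [List.length_drop, List.length_cons, List.length_nil] at hp ⊢; omega
      simp only [h1, dif_pos]
      rw [ih _ hlen]
      simp
    · by_cases h2 : PySem.Chars.startswith (PySem.Chars.strip t) ['[', ']']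
      · have hp := ((PySem.Chars.startswith_iff _ _).mp h2).length_le
        have hlen : ((PySem.Chars.strip t).drop 2).length ≤ n := by
          simp only [List.length_drop, List.length_cons, List.length_nil] at hp ⊢; omega
        simp only [h1, h2, dif_neg, dif_pos, not_false_iff]
        rw [ih _ hlen]
        simp
      · by_cases h3 : PySem.Chars.startswith (PySem.Chars.strip t) ['m','a','p','[','s','t','r','i','n','g',']']
        · have hp := ((PySem.Chars.startswith_iff _ _).mp h3).length_le
          have hlen : ((PySem.Chars.strip t).drop 11).length ≤ n := by
            simp only [List.length_drop, List.length_cons, List.length_nil] at hp ⊢; omega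
          simp only [h1, h2, h3, dif_neg, dif_pos, not_false_iff]
          rw [ih _ hlen]
          simp
        · simp [h1, h2, h3]

-- ===== VERDICT (by name: the statement is the Claim_ definition above) =====
theorem substitute_type_py_spec : Claim_equal_substitute_type_py := by
  intro t mapping _
  unfold Spec_substitute_type_py substitute_type_py substitute_type_py_alt
  rw [subst_eq_peel t.toList.length t.toList mapping le_rfl]
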